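-- pv_equiv track=rewrite | github.com/maximilien/maestro | api/ai_agent.py | _extract_yaml_block
-- ===== SOURCE A (Python) =====
-- from typing import Dict, Any, Optional
--
-- def _extract_yaml_block(text: str, start_pos: int) -> Optional[str]:
--     """Extract YAML block from text starting at a given position"""
--     try:
--         # Find the end of the YAML block by looking for proper indentation
--         lines = text[start_pos:].split("\n")
--         yaml_lines = []
--
--         for line in lines:
--             if line.strip() and not line.startswith("#"):
--                 yaml_lines.append(line)
--             elif line.strip() == "" and yaml_lines:
--                 break
--
--         if yaml_lines:
--             return "\n".join(yaml_lines)
--     except Exception: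
--         pass
--
--     return None
-- ===== SOURCE B (Python) =====
-- from typing import Optional
--
-- def _extract_yaml_block(text: str, start_pos: int) -> Optional[str]:
--     """Extract YAML block from text starting at a given position"""
--     try:
--         lines = text[start_pos:].split("\n")
--         n = len(lines)
--         # boundary indices: the block is lines[start:end]
--         start = next((k for k, l in enumerate(lines)
--                       if l.strip() and not l.startswith("#")), n)
--         end = start + next((j for j, l in enumerate(lines[start:])
--                             if not l.strip()), n - start)
--         block = [l for l in lines[start:end] if not l.startswith("#")]
--         return "\n".join(block) if block else None
--     except Exception:
--         return None
-- ===== Notes on version B (the rewrite author's own statement) =====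
-- stated objective: alternative
-- what changed: Instead of A's single stateful scan with an accumulator and a mid-loop break, B first computes the block's boundary indices (first content line, then first blank line after it), slices lines[start:end] and filters comments out of the slice.
import Mathlib
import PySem

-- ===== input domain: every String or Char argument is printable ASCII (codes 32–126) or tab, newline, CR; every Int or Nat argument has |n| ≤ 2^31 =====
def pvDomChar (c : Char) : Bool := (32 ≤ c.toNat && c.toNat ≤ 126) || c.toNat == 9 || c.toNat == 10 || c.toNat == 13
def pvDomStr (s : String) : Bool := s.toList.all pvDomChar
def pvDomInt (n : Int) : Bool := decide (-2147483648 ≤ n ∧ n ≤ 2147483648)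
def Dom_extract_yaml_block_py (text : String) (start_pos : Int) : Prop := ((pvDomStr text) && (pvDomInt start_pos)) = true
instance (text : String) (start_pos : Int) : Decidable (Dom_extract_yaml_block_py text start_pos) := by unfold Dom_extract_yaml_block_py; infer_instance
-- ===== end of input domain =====

-- B replaces A's accumulator loop with boundary-index computation + slice + filter; same O(n) cost, alternative decomposition.


-- ===== PORT A =====
-- the for-loop over lines with its accumulator yaml_lines; returning acc models the 'break'
def pvLoopA : List (List Char) → List (List Char) → List (List Char)
  | [], acc => acc
  | l :: rest, acc =>
    if !(PySem.Chars.strip l).isEmpty && !PySem.Chars.startswith l ['#'] then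
      pvLoopA rest (acc ++ [l])
    else if (PySem.Chars.strip l).isEmpty && !acc.isEmpty then
      acc
    else
      pvLoopA rest acc

def extract_yaml_block_py (text : String) (start_pos : Int) : Option String :=
  let lines := PySem.Chars.splitOn (PySem.List.slice text.toList (some start_pos) none) ['\n']
  let yaml_lines := pvLoopA lines []
  if !yaml_lines.isEmpty then some (String.ofList (PySem.Chars.join ['\n'] yaml_lines))
  else none

-- ===== PORT B =====
-- next((k for k, l in enumerate(ls) if p l), <default>) — the index of the first line satisfying p
def pvNextIdx (p : List Char → Bool) : List (List Char) → Option Nat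
  | [] => none
  | l :: rest => if p l then some 0 else (pvNextIdx p rest).map (· + 1)

def pvIsContent (l : List Char) : Bool := !(PySem.Chars.strip l).isEmpty && !PySem.Chars.startswith l ['#']
def pvIsBlank (l : List Char) : Bool := (PySem.Chars.strip l).isEmpty
def pvNotComment (l : List Char) : Bool := !PySem.Chars.startswith l ['#']

-- boundary indices start/stop, then the filtered slice lines[start:stop]
def pvAltBlock (lines : List (List Char)) : List (List Char) :=
  let n := lines.length
  let start := (pvNextIdx pvIsContent lines).getD n
  let stop := start + (pvNextIdx pvIsBlank (PySem.List.slice lines (some (start : Int)) none)).getD (n - start)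
  (PySem.List.slice lines (some (start : Int)) (some (stop : Int))).filter pvNotComment

def extract_yaml_block_py_alt (text : String) (start_pos : Int) : Option String :=
  let lines := PySem.Chars.splitOn (PySem.List.slice text.toList (some start_pos) none) ['\n']
  let block := pvAltBlock lines
  if block.isEmpty then none
  else some (String.ofList (PySem.Chars.join ['\n'] block))

-- ===== PRECONDITION & SPEC =====
def Spec_extract_yaml_block_py (text : String) (start_pos : Int) (out : Option String) : Prop := out = extract_yaml_block_py_alt text start_pos
instance (text : String) (start_pos : Int) (out : Option String) : Decidable (Spec_extract_yaml_block_py text start_pos out) := by unfold Spec_extract_yaml_block_py; infer_instance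

-- ===== CLAIM (what is proved, stated in full; the proofs are below) =====
def Claim_equal_extract_yaml_block_py : Prop := ∀ (text : String) (start_pos : Int), Dom_extract_yaml_block_py text start_pos → Spec_extract_yaml_block_py text start_pos (extract_yaml_block_py text start_pos)

-- ===== LEMMAS AND PROOFS =====

-- A's skip predicate (blank or comment) is the negation of B's content predicate
def pvSkip (l : List Char) : Bool := (PySem.Chars.strip l).isEmpty || PySem.Chars.startswith l ['#']

theorem pvSkip_eq_not_content (l : List Char) : pvSkip l = !pvIsContent l := by
  simp [pvSkip, pvIsContent]

-- dropping up to the first index where p holds = dropWhile (!p)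
theorem drop_pvNextIdx (p : List Char → Bool) (ls : List (List Char)) :
    ls.drop ((pvNextIdx p ls).getD ls.length) = ls.dropWhile (fun l => !p l) := by
  induction ls with
  | nil => rfl
  | cons l rest ih =>
    by_cases h : p l = true
    · simp [pvNextIdx, h, List.dropWhile]
    · have h' : p l = false := by simpa using h
      cases ho : pvNextIdx p rest with
      | none => simp [pvNextIdx, h', List.dropWhile, ho, ← ih]
      | some k => simp [pvNextIdx, h', List.dropWhile, ho, ← ih]

-- taking up to the first index where p holds = takeWhile (!p)
theorem take_pvNextIdx (p : List Char → Bool) (ls : List (List Char)) :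
    ls.take ((pvNextIdx p ls).getD ls.length) = ls.takeWhile (fun l => !p l) := by
  induction ls with
  | nil => rfl
  | cons l rest ih =>
    by_cases h : p l = true
    · simp [pvNextIdx, h, List.takeWhile]
    · have h' : p l = false := by simpa using h
      cases ho : pvNextIdx p rest with
      | none => simp [pvNextIdx, h', List.takeWhile, ho, ← ih]
      | some k => simp [pvNextIdx, h', List.takeWhile, ho, ← ih]

-- while pvSkip holds and acc is empty, A's loop just moves on
theorem pvLoopA_drop (ls : List (List Char)) :
    pvLoopA ls [] = pvLoopA (ls.dropWhile pvSkip) [] := by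
  induction ls with
  | nil => rfl
  | cons l rest ih =>
    by_cases h : pvSkip l = true
    · have h' : ¬(!(PySem.Chars.strip l).isEmpty && !PySem.Chars.startswith l ['#']) = true := by
        simp [pvSkip] at h ⊢; tauto
      simp [pvLoopA, h', h, ih]
    · simp [h]

-- once acc is nonempty, A's loop appends the filtered takeWhile of the rest
theorem pvLoopA_run (ls : List (List Char)) (acc : List (List Char)) (hacc : acc ≠ []) :
    pvLoopA ls acc = acc ++ (ls.takeWhile (fun l => !pvIsBlank l)).filter pvNotComment := by
  induction ls generalizing acc with
  | nil => simp [pvLoopA]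
  | cons l rest ih =>
    by_cases hs : (PySem.Chars.strip l).isEmpty = true
    · simp [pvLoopA, hs, hacc, pvIsBlank]
    · by_cases hc : PySem.Chars.startswith l ['#'] = true
      · have hnc : pvNotComment l = false := by simp [pvNotComment, hc]
        simp [pvLoopA, hs, hc, pvIsBlank, hnc, ih acc hacc]
      · have hnc : pvNotComment l = true := by simp [pvNotComment, hc]
        have := ih (acc ++ [l]) (by simp)
        simp [pvLoopA, hs, hc, pvIsBlank, hnc, this]

-- A's loop equals dropWhile-then-takeWhile-then-filter
theorem pvLoopA_eq (ls : List (List Char)) :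
    pvLoopA ls [] = ((ls.dropWhile pvSkip).takeWhile (fun l => !pvIsBlank l)).filter pvNotComment := by
  rw [pvLoopA_drop]
  cases hd : ls.dropWhile pvSkip with
  | nil => rfl
  | cons l rest =>
    have hl : pvSkip l = false := by
      have h2 := List.head?_dropWhile_not pvSkip ls
      rw [hd] at h2
      simpa using h2
    have hs : (PySem.Chars.strip l).isEmpty = false := by
      simp [pvSkip] at hl; simp [hl.1]
    have hc : PySem.Chars.startswith l ['#'] = false := by
      simp [pvSkip] at hl; exact hl.2
    have hnc : pvNotComment l = true := by simp [pvNotComment, hc]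
    have hrun := pvLoopA_run rest [l] (by simp)
    simp [pvLoopA, hs, hc, pvIsBlank, hnc, hrun, List.takeWhile]

-- B's boundary-index block equals A's loop
theorem pvBlock_eq (ls : List (List Char)) : pvAltBlock ls = pvLoopA ls [] := by
  rw [pvLoopA_eq]
  unfold pvAltBlock
  simp only [PySem.List.slice_from_natCast]
  set s := (pvNextIdx pvIsContent ls).getD ls.length with hs
  have hcast : ((s + (pvNextIdx pvIsBlank (ls.drop s)).getD (ls.length - s) : Nat) : Int)
      = (s : Int) + (((pvNextIdx pvIsBlank (ls.drop s)).getD (ls.length - s) : Nat) : Int) := by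
    push_cast; ring
  rw [hcast, PySem.List.slice_natCast_add]
  have hdrop : ls.drop s = ls.dropWhile pvSkip := by
    rw [hs, drop_pvNextIdx pvIsContent ls]
    congr 1
    funext l
    rw [pvSkip_eq_not_content]
  rw [hdrop]
  congr 1
  rw [← take_pvNextIdx pvIsBlank (ls.dropWhile pvSkip)]
  congr 1
  cases pvNextIdx pvIsBlank (ls.dropWhile pvSkip) with
  | some k => rfl
  | none =>
    -- no blank line after the block: both defaults are the suffix length
    simp only [Option.getD_none]
    rw [← hdrop, List.length_drop]

-- A returns (some/none) by '!empty', B by 'empty'; on the same list these agree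
theorem pvIf_eq (ys : List (List Char)) :
    (if !ys.isEmpty then some (String.ofList (PySem.Chars.join ['\n'] ys)) else none)
      = (if ys.isEmpty then none else some (String.ofList (PySem.Chars.join ['\n'] ys))) := by
  cases ys.isEmpty <;> simp

-- ===== VERDICT (by name: the statement is the Claim_ definition above) =====
theorem extract_yaml_block_py_spec : Claim_equal_extract_yaml_block_py := by
  intro text start_pos _
  unfold Spec_extract_yaml_block_py extract_yaml_block_py extract_yaml_block_py_alt
  simp only [pvBlock_eq, pvIf_eq]
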